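-- pv_equiv track=rewrite | github.com/arsalan-ahmed17/CS50-IntroCS | Graphs_Trees/mastodon_network/graph.py | edge_in_sp
-- ===== SOURCE A (Python) =====
-- from typing import List, Tuple, Optional, Union
--
-- def edge_in_sp(pair: Tuple[str, str], sp: List[str]) -> bool:
--     """
--     Checks if an edge exists in the given shortest path.
--
--     Parameters:
--     ----------
--     pair: Tuple containing the users that form the edge.
--     sp: The shortest path, represented as a list of vertices.
--
--     Returns:
--     ----------
--     Boolean value indicating the presence of the edge in the shortest path.
--     """
--     if not sp or len(sp) < 2:
--         return False
--     a, b = pair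
--     for i in range(len(sp) - 1):
--         # Check both orders.
--         if (sp[i] == a and sp[i + 1] == b) or (sp[i] == b and sp[i + 1] == a):
--             return True
--     return False
-- ===== SOURCE B (Python) =====
-- def edge_in_sp(pair, sp):
--     """Locate-then-verify: first collect the positions where the first endpoint
--     occurs, then check whether the second endpoint is adjacent to any of them."""
--     a, b = pair
--     hits = [i for i, x in enumerate(sp) if x == a]
--     return any((i + 1 < len(sp) and sp[i + 1] == b) or (i > 0 and sp[i - 1] == b)
--                for i in hits)
-- ===== Notes on version B (the rewrite author's own statement) =====
-- stated objective: alternative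
-- what changed: B is a staged locate-then-verify algorithm: it first collects all positions of the first endpoint a, then checks whether b sits at a neighbouring position of any of them, instead of A's single scan over all consecutive positions comparing both orientations at each; the short-path guard disappears naturally.
import Mathlib
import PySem

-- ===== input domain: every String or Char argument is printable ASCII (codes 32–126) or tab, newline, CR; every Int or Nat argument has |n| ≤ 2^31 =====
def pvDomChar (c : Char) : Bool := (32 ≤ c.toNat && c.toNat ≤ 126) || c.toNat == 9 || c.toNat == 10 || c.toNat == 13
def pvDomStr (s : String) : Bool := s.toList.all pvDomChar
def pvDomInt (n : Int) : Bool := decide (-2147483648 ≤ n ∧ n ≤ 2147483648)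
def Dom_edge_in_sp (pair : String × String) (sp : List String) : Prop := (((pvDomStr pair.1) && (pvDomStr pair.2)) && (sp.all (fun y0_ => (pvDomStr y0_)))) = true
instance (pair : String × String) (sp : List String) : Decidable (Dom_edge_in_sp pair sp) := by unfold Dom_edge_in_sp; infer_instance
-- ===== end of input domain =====

-- B is a staged locate-then-verify algorithm: collect the positions of endpoint a, then
-- check whether b is adjacent to any of them (alternative decomposition, same cost).

-- ===== PORT A =====
-- literal port: guard, then a scan of positions i in range(len(sp)-1) checking both orders
def edge_in_sp (pair : String × String) (sp : List String) : Bool :=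
  if sp = [] ∨ sp.length < 2 then false
  else
    let a := pair.1
    let b := pair.2
    (PySem.List.pyRange 0 ((sp.length : Int) - 1) 1).any (fun i =>
      (PySem.List.pyGetD sp i "" == a && PySem.List.pyGetD sp (i + 1) "" == b) ||
      (PySem.List.pyGetD sp i "" == b && PySem.List.pyGetD sp (i + 1) "" == a))

-- ===== PORT B =====
-- hits = [i for i, x in enumerate(sp) if x == a]; then any(neighbour of i holds b)
def edge_in_sp_alt (pair : String × String) (sp : List String) : Bool :=
  let a := pair.1
  let b := pair.2
  let hits : List Int :=
    ((PySem.List.enumerate sp).filter (fun ix => ix.2 == a)).map (fun ix => ix.1)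
  hits.any (fun i =>
    (decide (i + 1 < (sp.length : Int)) && (PySem.List.pyGetD sp (i + 1) "" == b)) ||
    (decide (0 < i) && (PySem.List.pyGetD sp (i - 1) "" == b)))

-- ===== PRECONDITION & SPEC =====
def Spec_edge_in_sp (pair : String × String) (sp : List String) (out : Bool) : Prop := out = edge_in_sp_alt pair sp
instance (pair : String × String) (sp : List String) (out : Bool) : Decidable (Spec_edge_in_sp pair sp out) := by unfold Spec_edge_in_sp; infer_instance

-- ===== CLAIM =====
def Claim_equal_edge_in_sp : Prop := ∀ (pair : String × String) (sp : List String), Dom_edge_in_sp pair sp → Spec_edge_in_sp pair sp (edge_in_sp pair sp)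

-- ===== LEMMAS AND PROOFS =====

-- A in existential form over natural indices
theorem edge_in_sp_iff (pair : String × String) (sp : List String) :
    edge_in_sp pair sp = true ↔
      ∃ i : ℕ, ∃ h : i + 1 < sp.length,
        ((sp[i] = pair.1 ∧ sp[i + 1] = pair.2) ∨ (sp[i] = pair.2 ∧ sp[i + 1] = pair.1)) := by
  unfold edge_in_sp
  by_cases hlen : sp = [] ∨ sp.length < 2
  · rw [if_pos hlen]
    constructor
    · intro h; simp at h
    rintro ⟨i, hi, -⟩
    rcases hlen with rfl | hlen
    · simp at hi
    · omega
  · rw [if_neg hlen]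
    simp only [List.any_eq_true, PySem.List.mem_pyRange_one, Bool.or_eq_true, Bool.and_eq_true,
      beq_iff_eq]
    constructor
    · rintro ⟨i, ⟨h0, h1⟩, hcond⟩
      obtain ⟨n, rfl⟩ := Int.eq_ofNat_of_zero_le h0
      have hn : n + 1 < sp.length := by omega
      refine ⟨n, hn, ?_⟩
      have e1 : PySem.List.pyGetD sp (n : Int) "" = sp[n] := by
        rw [PySem.List.pyGetD_natCast, List.getD_eq_getElem _ _ (by omega)]
      have e2 : PySem.List.pyGetD sp ((n : Int) + 1) "" = sp[n + 1] := by
        have : ((n : Int) + 1) = ((n + 1 : ℕ) : Int) := by push_cast; ring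
        rw [this, PySem.List.pyGetD_natCast, List.getD_eq_getElem _ _ hn]
      rw [e1, e2] at hcond
      exact hcond
    · rintro ⟨n, hn, hcond⟩
      refine ⟨(n : Int), ⟨by positivity, by omega⟩, ?_⟩
      have e1 : PySem.List.pyGetD sp (n : Int) "" = sp[n] := by
        rw [PySem.List.pyGetD_natCast, List.getD_eq_getElem _ _ (by omega)]
      have e2 : PySem.List.pyGetD sp ((n : Int) + 1) "" = sp[n + 1] := by
        have : ((n : Int) + 1) = ((n + 1 : ℕ) : Int) := by push_cast; ring
        rw [this, PySem.List.pyGetD_natCast, List.getD_eq_getElem _ _ hn]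
      rw [e1, e2]
      exact hcond

-- membership in B's hits list
theorem mem_hits (a : String) (sp : List String) (i : Int) :
    (i ∈ ((PySem.List.enumerate sp).filter (fun ix => ix.2 == a)).map (fun ix => ix.1)) ↔
    ∃ k : ℕ, ∃ _ : k < sp.length, i = (k : Int) ∧ sp[k] = a := by
  constructor
  · intro h
    obtain ⟨ix, hix, rfl⟩ := List.mem_map.mp h
    obtain ⟨hmem, hfil⟩ := List.mem_filter.mp hix
    obtain ⟨k, hk, rfl⟩ := (PySem.List.mem_enumerate_iff _ _ _).mp hmem
    exact ⟨k, hk, by simp, by simpa using hfil⟩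
  · rintro ⟨k, hk, rfl, ha⟩
    refine List.mem_map.mpr ⟨((0 : Int) + k, sp[k]), List.mem_filter.mpr
      ⟨(PySem.List.mem_enumerate_iff _ _ _).mpr ⟨k, hk, rfl⟩, by simpa using ha⟩, by simp⟩

-- B in the same existential form
theorem edge_in_sp_alt_iff (pair : String × String) (sp : List String) :
    edge_in_sp_alt pair sp = true ↔
      ∃ i : ℕ, ∃ h : i + 1 < sp.length,
        ((sp[i] = pair.1 ∧ sp[i + 1] = pair.2) ∨ (sp[i] = pair.2 ∧ sp[i + 1] = pair.1)) := by
  unfold edge_in_sp_alt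
  simp only [List.any_eq_true]
  constructor
  · rintro ⟨i, hmem, hcond⟩
    obtain ⟨k, hk, rfl, ha⟩ := (mem_hits pair.1 sp i).mp hmem
    simp only [Bool.or_eq_true, Bool.and_eq_true, decide_eq_true_eq, beq_iff_eq] at hcond
    rcases hcond with ⟨hlt, hb⟩ | ⟨hpos, hb⟩
    · have hk1 : k + 1 < sp.length := by exact_mod_cast (by omega : ((k : Int) + 1) < sp.length)
      refine ⟨k, hk1, Or.inl ⟨ha, ?_⟩⟩
      have hc : ((k : Int) + 1) = ((k + 1 : ℕ) : Int) := by push_cast; ring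
      rw [hc, PySem.List.pyGetD_natCast, List.getD_eq_getElem _ _ hk1] at hb
      exact hb
    · have hkpos : 0 < k := by exact_mod_cast hpos
      refine ⟨k - 1, by omega, Or.inr ⟨?_, ?_⟩⟩
      · have hc : ((k : Int) - 1) = ((k - 1 : ℕ) : Int) := by omega
        rw [hc, PySem.List.pyGetD_natCast, List.getD_eq_getElem _ _ (by omega)] at hb
        exact hb
      · have hc : k - 1 + 1 = k := by omega
        simpa only [hc] using ha
  · rintro ⟨n, hn, hcond⟩
    rcases hcond with ⟨ha, hb⟩ | ⟨hb, ha⟩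
    · refine ⟨(n : Int), (mem_hits pair.1 sp _).mpr ⟨n, by omega, rfl, ha⟩, ?_⟩
      simp only [Bool.or_eq_true, Bool.and_eq_true, decide_eq_true_eq, beq_iff_eq]
      refine Or.inl ⟨by exact_mod_cast hn, ?_⟩
      have hc : ((n : Int) + 1) = ((n + 1 : ℕ) : Int) := by push_cast; ring
      rw [hc, PySem.List.pyGetD_natCast, List.getD_eq_getElem _ _ hn]
      exact hb
    · refine ⟨((n + 1 : ℕ) : Int), (mem_hits pair.1 sp _).mpr ⟨n + 1, hn, rfl, ha⟩, ?_⟩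
      simp only [Bool.or_eq_true, Bool.and_eq_true, decide_eq_true_eq, beq_iff_eq]
      refine Or.inr ⟨by positivity, ?_⟩
      have hc : (((n + 1 : ℕ) : Int) - 1) = ((n : ℕ) : Int) := by push_cast; ring
      rw [hc, PySem.List.pyGetD_natCast, List.getD_eq_getElem _ _ (by omega)]
      exact hb

-- ===== VERDICT =====
theorem edge_in_sp_spec : Claim_equal_edge_in_sp := by
  intro pair sp _
  unfold Spec_edge_in_sp
  rw [Bool.eq_iff_iff, edge_in_sp_iff, edge_in_sp_alt_iff]
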